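-- pv_equiv track=rewrite | github.com/jakehoare/leetcode | 803_Bricks_Falling_When_Hit.py | hitBricks
-- ===== SOURCE A (Python) =====
-- def hitBricks(grid, hits):
--     """
--     :type grid: List[List[int]]
--     :type hits: List[List[int]]
--     :rtype: List[int]
--     """
--     rows, cols = len(grid), len(grid[0])
--     nbors = ((1, 0), (0, 1), (-1, 0), (0, -1))
--
--     for r, c in hits:  # set to zero if a brick was hit, else set to -1
--         grid[r][c] -= 1
--
--     def dfs(row, col):
--         if row < 0 or row >= rows or col < 0 or col >= cols:
--             return 0
--         if grid[row][col] != 1: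
--             return 0
--         grid[row][col] = 2
--         return 1 + sum(dfs(row + dr, col + dc) for dr, dc in nbors)
--
--     for c in range(cols):
--         dfs(0, c)
--
--     def connected(r, c):
--         if r == 0:
--             return True
--         return any(0 <= (r + dr) < rows and 0 <= (c + dc) < cols \
--                    and grid[r + dr][c + dc] == 2 for dr, dc in nbors)
--
--     result = []
--     for r, c in reversed(hits):
--         grid[r][c] += 1
--         if grid[r][c] == 1 and connected(r, c):
--             result.append(dfs(r, c) - 1)  # ignore erased brick
--         else:
--             result.append(0)
--
--     return result[::-1]
-- ===== SOURCE B (Python) =====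
-- # Iterative multi-source flood fill with an explicit stack replaces A's recursive DFS.
-- # Like A, mutates `grid` in place (decrement/restore hits, mark stable bricks with 2).
-- def hitBricks(grid, hits):
--     rows, cols = len(grid), len(grid[0])
--
--     for r, c in hits:
--         grid[r][c] -= 1
--
--     def fill(stack):
--         n = 0
--         while stack:
--             r, c = stack.pop()
--             if 0 <= r < rows and 0 <= c < cols and grid[r][c] == 1:
--                 grid[r][c] = 2
--                 n += 1
--                 stack.extend(((r, c - 1), (r - 1, c), (r, c + 1), (r + 1, c)))
--         return n
--
--     fill([(0, c) for c in reversed(range(cols))])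
--
--     def supported(r, c):
--         if r == 0:
--             return True
--         return any(0 <= r + dr < rows and 0 <= c + dc < cols
--                    and grid[r + dr][c + dc] == 2
--                    for dr, dc in ((1, 0), (0, 1), (-1, 0), (0, -1)))
--
--     out = []
--     for r, c in reversed(hits):
--         grid[r][c] += 1
--         if grid[r][c] == 1 and supported(r, c):
--             out.append(fill([(r, c)]) - 1)
--         else:
--             out.append(0)
--     out.reverse()
--     return out
-- ===== Notes on version B (the rewrite author's own statement) =====
-- stated objective: alternative
-- what changed: A's recursive DFS flood fill (one recursive dfs per top-row column) is replaced by an iterative explicit-stack flood fill seeded once with the whole top row as a multi-source stack, so B uses no recursion at all (no Python recursion-depth limit).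
-- outside the precondition, e.g. on hitBricks([[1, 0], [0]], []): A returns [], B returns []; on hitBricks([[0, 0], [0]], [[0, 0]]): A returns [0], B returns [0]
import Mathlib
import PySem

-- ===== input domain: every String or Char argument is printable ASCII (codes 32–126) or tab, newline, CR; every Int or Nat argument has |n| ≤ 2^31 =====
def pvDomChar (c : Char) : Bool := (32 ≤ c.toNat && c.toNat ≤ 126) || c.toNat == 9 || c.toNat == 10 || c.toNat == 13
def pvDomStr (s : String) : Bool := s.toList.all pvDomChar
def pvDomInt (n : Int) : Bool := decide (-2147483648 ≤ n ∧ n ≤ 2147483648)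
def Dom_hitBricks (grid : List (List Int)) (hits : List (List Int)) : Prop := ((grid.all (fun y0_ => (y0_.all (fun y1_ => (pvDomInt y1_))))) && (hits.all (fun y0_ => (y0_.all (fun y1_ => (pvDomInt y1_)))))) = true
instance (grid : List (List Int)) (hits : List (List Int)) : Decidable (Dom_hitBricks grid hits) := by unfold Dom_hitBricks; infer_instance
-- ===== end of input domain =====

-- B replaces A's recursive DFS flood fill by an iterative explicit-stack flood fill
-- (one multi-source fill for the whole top row); same return value, and both versions
-- mutate `grid` in place in the same way (decrement/restore hits, mark stable bricks 2).

-- shared grid primitives (Python's grid[r][c] reads/writes, used by both ports)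
def gget (g : List (List Int)) (r c : Nat) : Int := (g.getD r []).getD c 0
def gset (g : List (List Int)) (r c : Nat) (v : Int) : List (List Int) :=
  g.set r ((g.getD r []).set c v)
-- number of cells currently equal to 1 (fuel bound for A's dfs / termination measure for B's fill)
def ones (g : List (List Int)) : Nat := (g.map (fun row => row.countP (fun x => x == 1))).sum
-- Python index semantics for `grid[r][c] -= 1` / `+= 1` / `== 1` on hit coordinates
-- (negative index wraps once by the length; Pre_ admits exactly the in-range cases)
def pyWrap (len : Nat) (i : Int) : Int := if i < 0 then i + len else i
def hAdd (g : List (List Int)) (r c d : Int) : List (List Int) :=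
  let ri := (pyWrap g.length r).toNat
  let row := g.getD ri []
  let ci := (pyWrap row.length c).toNat
  g.set ri (row.set ci (row.getD ci 0 + d))
def hGet (g : List (List Int)) (r c : Int) : Int :=
  let ri := (pyWrap g.length r).toNat
  let row := g.getD ri []
  row.getD (pyWrap row.length c).toNat 0

-- ===== PORT A =====
-- A's recursive dfs; fuel `ones g + 1` at each call site is always sufficient, since every
-- recursive step first turns a 1-cell into 2.
def dfsA (rows cols : Nat) : Nat → List (List Int) → Int → Int → List (List Int) × Int
  | 0, g, _, _ => (g, 0)
  | f+1, g, r, c =>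
    if r < 0 ∨ (rows : Int) ≤ r ∨ c < 0 ∨ (cols : Int) ≤ c then (g, 0)
    else if gget g r.toNat c.toNat ≠ 1 then (g, 0)
    else
      let g0 := gset g r.toNat c.toNat 2
      let p1 := dfsA rows cols f g0 (r+1) c
      let p2 := dfsA rows cols f p1.1 r (c+1)
      let p3 := dfsA rows cols f p2.1 (r-1) c
      let p4 := dfsA rows cols f p3.1 r (c-1)
      (p4.1, 1 + p1.2 + p2.2 + p3.2 + p4.2)

-- A's `connected(r, c)`
def connectedA (rows cols : Nat) (g : List (List Int)) (r c : Int) : Bool :=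
  if r = 0 then true else
  [((1:Int),(0:Int)), (0,1), (-1,0), (0,-1)].any (fun d =>
    decide (0 ≤ r + d.1) && decide (r + d.1 < (rows : Int)) &&
    decide (0 ≤ c + d.2) && decide (c + d.2 < (cols : Int)) &&
    (gget g (r + d.1).toNat (c + d.2).toNat == 2))

def hitBricks (grid : List (List Int)) (hits : List (List Int)) : List Int :=
  let rows := grid.length
  let cols := (grid.headD []).length
  let g1 := hits.foldl (fun g h => hAdd g (h.getD 0 0) (h.getD 1 0) (-1)) grid
  let g2 := (List.range cols).foldl
      (fun g c => (dfsA rows cols (ones g + 1) g 0 (c : Int)).1) g1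
  let st := hits.reverse.foldl (fun (st : List (List Int) × List Int) h =>
      let r : Int := h.getD 0 0
      let c : Int := h.getD 1 0
      let g := hAdd st.1 r c 1
      if hGet g r c = 1 ∧ connectedA rows cols g r c = true then
        let p := dfsA rows cols (ones g + 1) g r c
        (p.1, st.2 ++ [p.2 - 1])
      else (g, st.2 ++ [(0 : Int)])) (g2, ([] : List Int))
  st.2.reverse

-- ===== PORT B =====
-- lemma the port needs for termination of the explicit-stack fill: marking a 1-cell with 2
-- decreases the number of 1-cells by exactly one.
theorem countP_set_one : ∀ (l : List Int) (c : Nat), l.getD c 0 = 1 →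
    (l.set c 2).countP (fun x => x == 1) + 1 = l.countP (fun x => x == 1) := by
  intro l
  induction l with
  | nil => intro c h; simp at h
  | cons a t ih =>
    intro c h
    cases c with
    | zero =>
      simp [List.getD] at h
      simp [h]
    | succ c =>
      have h' : t.getD c 0 = 1 := by simpa [List.getD] using h
      have := ih c h'
      simp only [List.set_cons_succ, List.countP_cons]
      omega

theorem ones_gset_two : ∀ (g : List (List Int)) (r c : Nat), gget g r c = 1 →
    ones (gset g r c 2) + 1 = ones g := by
  intro g
  induction g with
  | nil => intro r c h; simp [gget] at h
  | cons row t ih =>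
    intro r c h
    cases r with
    | zero =>
      have h' : row.getD c 0 = 1 := by simpa [gget, List.getD] using h
      have hc := countP_set_one row c h'
      simp only [gset, List.getD, List.getElem?_cons_zero, Option.getD_some,
        List.set_cons_zero, ones, List.map_cons, List.sum_cons]
      omega
    | succ r =>
      have h' : gget t r c = 1 := by simpa [gget, List.getD] using h
      have := ih r c h'
      simp only [gset, List.getD, List.getElem?_cons_succ, List.set_cons_succ,
        ones, List.map_cons, List.sum_cons] at *
      omega

-- B's `fill(stack)`: iterative flood fill with an explicit stack (head of the list = top of
-- the Python stack; the push order makes pop order match Python's).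
def fillB (rows cols : Nat) (g : List (List Int)) (st : List (Int × Int)) (n : Int) :
    List (List Int) × Int :=
  match st with
  | [] => (g, n)
  | (r, c) :: s =>
    if h : 0 ≤ r ∧ r < (rows : Int) ∧ 0 ≤ c ∧ c < (cols : Int) ∧ gget g r.toNat c.toNat = 1 then
      fillB rows cols (gset g r.toNat c.toNat 2)
        ((r+1, c) :: (r, c+1) :: (r-1, c) :: (r, c-1) :: s) (n+1)
    else fillB rows cols g s n
termination_by 5 * ones g + st.length
decreasing_by
  · have h1 := ones_gset_two g r.toNat c.toNat h.2.2.2.2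
    simp only [List.length_cons]
    omega
  · simp only [List.length_cons]
    omega

-- B's `supported(r, c)`
def connectedB (rows cols : Nat) (g : List (List Int)) (r c : Int) : Bool :=
  if r = 0 then true else
  [((1:Int),(0:Int)), (0,1), (-1,0), (0,-1)].any (fun d =>
    decide (0 ≤ r + d.1) && decide (r + d.1 < (rows : Int)) &&
    decide (0 ≤ c + d.2) && decide (c + d.2 < (cols : Int)) &&
    (gget g (r + d.1).toNat (c + d.2).toNat == 2))

def hitBricks_alt (grid : List (List Int)) (hits : List (List Int)) : List Int :=
  let rows := grid.length
  let cols := (grid.headD []).length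
  let g1 := hits.foldl (fun g h => hAdd g (h.getD 0 0) (h.getD 1 0) (-1)) grid
  let g2 := (fillB rows cols g1 ((List.range cols).map (fun c => ((0 : Int), (c : Int)))) 0).1
  let st := hits.reverse.foldl (fun (st : List (List Int) × List Int) h =>
      let r : Int := h.getD 0 0
      let c : Int := h.getD 1 0
      let g := hAdd st.1 r c 1
      if hGet g r c = 1 ∧ connectedB rows cols g r c = true then
        let p := fillB rows cols g [(r, c)] 0
        (p.1, st.2 ++ [p.2 - 1])
      else (g, st.2 ++ [(0 : Int)])) (g2, ([] : List Int))
  st.2.reverse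

-- ===== PRECONDITION & SPEC =====
-- Pre_ excludes exactly the closed-form shapes on which Python A can raise: an empty grid
-- (IndexError on grid[0]); a hit that is not a pair (ValueError on unpacking); a hit whose
-- (negatively wrapped) coordinates fall outside its row/column range (IndexError); and a grid
-- with a row shorter than row 0 (IndexError when the traversal touches a missing cell —
-- whether it actually raises depends on the dynamic run, so such grids are conservatively
-- excluded unless they are trivially safe: no hits and no brick in row 0).
def Pre_hitBricks (grid : List (List Int)) (hits : List (List Int)) : Prop :=
  grid ≠ [] ∧
  (∀ h ∈ hits, h.length = 2 ∧
    0 ≤ pyWrap grid.length (h.getD 0 0) ∧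
    pyWrap grid.length (h.getD 0 0) < (grid.length : Int) ∧
    0 ≤ pyWrap (grid.getD (pyWrap grid.length (h.getD 0 0)).toNat []).length (h.getD 1 0) ∧
    pyWrap (grid.getD (pyWrap grid.length (h.getD 0 0)).toNat []).length (h.getD 1 0)
      < ((grid.getD (pyWrap grid.length (h.getD 0 0)).toNat []).length : Int)) ∧
  ((∀ row ∈ grid, (grid.headD []).length ≤ row.length) ∨
    (hits = [] ∧ ∀ x ∈ grid.headD [], ¬ x = 1))
instance (grid : List (List Int)) (hits : List (List Int)) : Decidable (Pre_hitBricks grid hits) := by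
  unfold Pre_hitBricks; infer_instance

def pvWitness_hitBricks : List (List Int) × List (List Int) :=
  ([[1, 0, 0], [1, 1, 0]], [[1, 1], [0, 0]])

def Spec_hitBricks (grid : List (List Int)) (hits : List (List Int)) (out : List Int) : Prop := out = hitBricks_alt grid hits
instance (grid : List (List Int)) (hits : List (List Int)) (out : List Int) : Decidable (Spec_hitBricks grid hits out) := by unfold Spec_hitBricks; infer_instance

-- ===== CLAIM (what is proved, stated in full; the proofs are below) =====
def Claim_equal_hitBricks : Prop := ∀ (grid : List (List Int)) (hits : List (List Int)), Dom_hitBricks grid hits → Pre_hitBricks grid hits → Spec_hitBricks grid hits (hitBricks grid hits)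

-- ===== LEMMAS AND PROOFS =====

-- dfs never increases the number of 1-cells
theorem ones_dfs_le (rows cols : Nat) : ∀ (f : Nat) (g : List (List Int)) (r c : Int),
    ones (dfsA rows cols f g r c).1 ≤ ones g := by
  intro f
  induction f with
  | zero => intro g r c; simp [dfsA]
  | succ f ih =>
    intro g r c
    rw [dfsA]
    split
    · simp
    · split
      · simp
      · rename_i hb hv
        have hv' : gget g r.toNat c.toNat = 1 := by
          by_contra h; exact hv h
        have e0 := ones_gset_two g r.toNat c.toNat hv'
        dsimp only
        have t1 := ih (gset g r.toNat c.toNat 2) (r+1) c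
        have t2 := ih (dfsA rows cols f (gset g r.toNat c.toNat 2) (r+1) c).1 r (c+1)
        have t3 := ih (dfsA rows cols f (dfsA rows cols f (gset g r.toNat c.toNat 2) (r+1) c).1 r (c+1)).1 (r-1) c
        have t4 := ih (dfsA rows cols f (dfsA rows cols f (dfsA rows cols f (gset g r.toNat c.toNat 2) (r+1) c).1 r (c+1)).1 (r-1) c).1 r (c-1)
        omega

-- core simulation: processing the top of the stack completely equals one recursive dfs call
theorem fill_dfs (rows cols : Nat) : ∀ (f : Nat) (g : List (List Int)) (r c : Int)
    (s : List (Int × Int)) (n : Int), ones g + 1 ≤ f →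
    fillB rows cols g ((r, c) :: s) n
      = fillB rows cols (dfsA rows cols f g r c).1 s (n + (dfsA rows cols f g r c).2) := by
  intro f
  induction f with
  | zero => intro g r c s n h; omega
  | succ f ih =>
    intro g r c s n hf
    by_cases hb : r < 0 ∨ (rows : Int) ≤ r ∨ c < 0 ∨ (cols : Int) ≤ c
    · have hnc : ¬(0 ≤ r ∧ r < (rows : Int) ∧ 0 ≤ c ∧ c < (cols : Int) ∧
          gget g r.toNat c.toNat = 1) := by
        intro hC
        obtain ⟨a1, a2, a3, a4, -⟩ := hC
        rcases hb with h | h | h | h <;> omega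
      have hd : dfsA rows cols (f+1) g r c = (g, 0) := by rw [dfsA, if_pos hb]
      rw [hd, fillB, dif_neg hnc, add_zero]
    · by_cases hv : gget g r.toNat c.toNat = 1
      · have hbneg := hb
        simp only [not_or, not_lt, not_le] at hb
        have e0 := ones_gset_two g r.toNat c.toNat hv
        have m1 := ones_dfs_le rows cols f (gset g r.toNat c.toNat 2) (r+1) c
        have m2 := ones_dfs_le rows cols f
          (dfsA rows cols f (gset g r.toNat c.toNat 2) (r+1) c).1 r (c+1)
        have m3 := ones_dfs_le rows cols f
          (dfsA rows cols f (dfsA rows cols f (gset g r.toNat c.toNat 2) (r+1) c).1 r (c+1)).1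
          (r-1) c
        rw [fillB, dif_pos ⟨hb.1, hb.2.1, hb.2.2.1, hb.2.2.2, hv⟩,
            ih (gset g r.toNat c.toNat 2) (r+1) c _ _ (by omega),
            ih (dfsA rows cols f (gset g r.toNat c.toNat 2) (r+1) c).1 r (c+1) _ _ (by omega),
            ih (dfsA rows cols f (dfsA rows cols f (gset g r.toNat c.toNat 2) (r+1) c).1
              r (c+1)).1 (r-1) c _ _ (by omega),
            ih (dfsA rows cols f (dfsA rows cols f (dfsA rows cols f
              (gset g r.toNat c.toNat 2) (r+1) c).1 r (c+1)).1 (r-1) c).1 r (c-1) _ _ (by omega)]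
        conv_rhs => rw [dfsA, if_neg hbneg, if_neg (not_not_intro hv)]
        dsimp only
        congr 1
        ring
      · have hd : dfsA rows cols (f+1) g r c = (g, 0) := by
          rw [dfsA, if_neg hb, if_pos hv]
        rw [hd, fillB, dif_neg (fun hC => hv hC.2.2.2.2), add_zero]

-- multi-source fill = folding dfs over the seed points (counts are discarded)
theorem fill_foldl (rows cols : Nat) : ∀ (pts : List (Int × Int)) (g : List (List Int)) (n : Int),
    (fillB rows cols g pts n).1
      = pts.foldl (fun g p => (dfsA rows cols (ones g + 1) g p.1 p.2).1) g := by
  intro pts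
  induction pts with
  | nil => intro g n; rw [fillB]; rfl
  | cons p s ih =>
    intro g n
    obtain ⟨r, c⟩ := p
    rw [fill_dfs rows cols (ones g + 1) g r c s n (le_refl _), List.foldl_cons]
    exact ih _ _

-- single-source fill = one dfs call (grid and count)
theorem fill_single (rows cols : Nat) (g : List (List Int)) (r c : Int) :
    fillB rows cols g [(r, c)] 0 = dfsA rows cols (ones g + 1) g r c := by
  rw [fill_dfs rows cols (ones g + 1) g r c [] 0 (le_refl _), fillB, zero_add]

theorem connectedB_eq : @connectedB = @connectedA := rfl

theorem ports_eq (grid hits : List (List Int)) : hitBricks grid hits = hitBricks_alt grid hits := by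
  simp only [hitBricks, hitBricks_alt, fill_foldl, List.foldl_map, fill_single, connectedB_eq]

-- ===== VERDICT (by name: the statement is the Claim_ definition above) =====
theorem hitBricks_spec : Claim_equal_hitBricks := by
  intro grid hits _ _
  unfold Spec_hitBricks
  exact ports_eq grid hits
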